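-- pv_equiv track=rewrite | github.com/TudorMurariu/UBB-INFO | an2/Semestrul2/AI/Laboratoare/Lab1/11.py | delete_zeros
-- ===== SOURCE A (Python) =====
-- def delete_zeros(matrix):
--     rez = [[1 for x in range(len(matrix[0]))] for y in range(len(matrix))]
--
--     for i in range(len(matrix)):
--         if matrix[i][0] == 0:
--             lee(matrix, rez, i, 0)
--         if matrix[i][len(matrix[0])-1] == 0:
--             lee(matrix, rez, i, len(matrix[0])-1)
--
--     for j in range(len(matrix[0])):
--         if matrix[0][j] == 0:
--             lee(matrix, rez, 0, j)
--         if matrix[len(matrix)-1][j] == 0: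
--             lee(matrix, rez, len(matrix)-1, j)
--
--     return rez
--
-- def lee(matrix, rez, x, y):
--     if rez[x][y] == 0:
--         return None
--
--     rez[x][y] = 0
--
--     if x > 0 and matrix[x-1][y] == 0:
--         lee(matrix, rez, x-1, y)
--     if x < len(matrix) - 1 and matrix[x+1][y] == 0:
--         lee(matrix, rez, x+1, y)
--     if y > 0 and matrix[x][y-1] == 0:
--         lee(matrix, rez, x, y-1)
--     if y < len(matrix[0]) - 1 and matrix[x][y+1] == 0:
--         lee(matrix, rez, x, y+1)
-- ===== SOURCE B (Python) =====
-- def delete_zeros(matrix):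
--     n = len(matrix)
--     m = len(matrix[0])
--     rez = [[1 for x in range(m)] for y in range(n)]
--
--     seeds = []
--     for i in range(n):
--         if matrix[i][0] == 0:
--             seeds.append((i, 0))
--         if matrix[i][m - 1] == 0:
--             seeds.append((i, m - 1))
--     for j in range(m):
--         if matrix[0][j] == 0:
--             seeds.append((0, j))
--         if matrix[n - 1][j] == 0:
--             seeds.append((n - 1, j))
--
--     for seed in seeds:
--         stack = [seed]
--         while stack:
--             x, y = stack.pop()
--             if rez[x][y] == 0:
--                 continue
--             rez[x][y] = 0
--             for nx, ny in ((x, y + 1), (x, y - 1), (x + 1, y), (x - 1, y)):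
--                 if 0 <= nx < n and 0 <= ny < m and matrix[nx][ny] == 0:
--                     stack.append((nx, ny))
--     return rez
-- ===== Notes on version B (the rewrite author's own statement) =====
-- stated objective: alternative
-- what changed: The recursive flood-fill helper `lee` is replaced by an iterative algorithm: one pass collects all zero-valued border cells as seeds, then each seed is flood-filled with an explicit stack worklist (pop a cell, skip if already marked, mark it, push its in-bounds zero neighbours).
import Mathlib
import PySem

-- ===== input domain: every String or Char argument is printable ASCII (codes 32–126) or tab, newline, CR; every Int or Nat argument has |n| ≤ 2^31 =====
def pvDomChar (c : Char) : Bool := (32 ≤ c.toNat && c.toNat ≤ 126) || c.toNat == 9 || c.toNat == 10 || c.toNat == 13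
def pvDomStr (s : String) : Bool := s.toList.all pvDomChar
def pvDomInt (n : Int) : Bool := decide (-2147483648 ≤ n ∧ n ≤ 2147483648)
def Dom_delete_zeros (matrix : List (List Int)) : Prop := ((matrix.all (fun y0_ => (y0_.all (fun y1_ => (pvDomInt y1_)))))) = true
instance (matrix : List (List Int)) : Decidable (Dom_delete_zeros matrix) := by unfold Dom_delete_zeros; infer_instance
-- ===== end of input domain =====

-- B replaces A's recursive flood fill by an iterative one: a border seed pass followed by an
-- explicit stack worklist per seed (objective: alternative decomposition, same cost).

-- shared low-level memory model: rez[x][y] reads/writes (in-bounds on every admitted input; default 0 is never read there)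
def getC (r : List (List Int)) (x y : Int) : Int := (r.getD x.toNat []).getD y.toNat 0
def rset (r : List (List Int)) (x y : Int) (v : Int) : List (List Int) :=
  r.set x.toNat ((r.getD x.toNat []).set y.toNat v)

-- ===== PORT A =====
-- recursive helper `lee`, ported with fuel n*m+1 (the recursion depth is bounded by the number of 1-cells)
def leeF (mat : List (List Int)) (n m : Int) : Nat → List (List Int) → Int → Int → List (List Int)
  | 0, r, _, _ => r
  | f+1, r, x, y =>
    if getC r x y = 0 then r
    else
      let r1 := rset r x y 0
      let r2 := if 0 < x ∧ getC mat (x-1) y = 0 then leeF mat n m f r1 (x-1) y else r1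
      let r3 := if x < n - 1 ∧ getC mat (x+1) y = 0 then leeF mat n m f r2 (x+1) y else r2
      let r4 := if 0 < y ∧ getC mat x (y-1) = 0 then leeF mat n m f r3 x (y-1) else r3
      if y < m - 1 ∧ getC mat x (y+1) = 0 then leeF mat n m f r4 x (y+1) else r4

def delete_zeros (matrix : List (List Int)) : List (List Int) :=
  let n : Int := matrix.length
  let m : Int := (matrix.headD []).length
  let fuel : Nat := matrix.length * (matrix.headD []).length + 1
  let rez0 := (List.range matrix.length).map (fun _ => (List.range (matrix.headD []).length).map (fun _ => (1:Int)))
  let r1 := (List.range matrix.length).foldl (fun r (i : Nat) =>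
      let r := if getC matrix (i:Int) 0 = 0 then leeF matrix n m fuel r (i:Int) 0 else r
      if getC matrix (i:Int) (m-1) = 0 then leeF matrix n m fuel r (i:Int) (m-1) else r) rez0
  (List.range (matrix.headD []).length).foldl (fun r (j : Nat) =>
      let r := if getC matrix 0 (j:Int) = 0 then leeF matrix n m fuel r 0 (j:Int) else r
      if getC matrix (n-1) (j:Int) = 0 then leeF matrix n m fuel r (n-1) (j:Int) else r) r1

-- ===== PORT B =====
-- the `for nx, ny in (...)` push loop of Source B (stack top = list head)
def pushNbrs (mat : List (List Int)) (n m : Int) (x y : Int) (st : List (Int × Int)) : List (Int × Int) :=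
  [(x, y+1), (x, y-1), (x+1, y), (x-1, y)].foldl
    (fun acc p => if 0 ≤ p.1 ∧ p.1 < n ∧ 0 ≤ p.2 ∧ p.2 < m ∧ getC mat p.1 p.2 = 0 then p :: acc else acc) st

-- the `while stack:` worklist of Source B, with fuel (each iteration pops once)
def loopB (mat : List (List Int)) (n m : Int) : Nat → List (List Int) → List (Int × Int) → List (List Int)
  | 0, r, _ => r
  | _+1, r, [] => r
  | f+1, r, (x, y) :: st =>
    if getC r x y = 0 then loopB mat n m f r st
    else loopB mat n m f (rset r x y 0) (pushNbrs mat n m x y st)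

def delete_zeros_alt (matrix : List (List Int)) : List (List Int) :=
  let n : Int := matrix.length
  let m : Int := (matrix.headD []).length
  let rez0 := (List.range matrix.length).map (fun _ => (List.range (matrix.headD []).length).map (fun _ => (1:Int)))
  let seeds := (List.range matrix.length).foldl (fun s (i : Nat) =>
      let s := if getC matrix (i:Int) 0 = 0 then s ++ [((i:Int), (0:Int))] else s
      if getC matrix (i:Int) (m-1) = 0 then s ++ [((i:Int), m-1)] else s) []
  let seeds := (List.range (matrix.headD []).length).foldl (fun s (j : Nat) =>
      let s := if getC matrix 0 (j:Int) = 0 then s ++ [((0:Int), (j:Int))] else s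
      if getC matrix (n-1) (j:Int) = 0 then s ++ [(n-1, (j:Int))] else s) seeds
  seeds.foldl (fun r s =>
      loopB matrix n m (4 * (matrix.length * (matrix.headD []).length) + 2) r [s]) rez0

-- ===== PRECONDITION & SPEC =====
-- Pre_ = exactly the inputs on which Python A returns: a nonempty matrix whose first row is nonempty
-- and whose every row is at least as long as the first (otherwise A raises IndexError).
def Pre_delete_zeros (matrix : List (List Int)) : Prop :=
  matrix ≠ [] ∧ 0 < (matrix.headD []).length ∧
    ∀ row ∈ matrix, (matrix.headD []).length ≤ row.length
instance (matrix : List (List Int)) : Decidable (Pre_delete_zeros matrix) := by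
  unfold Pre_delete_zeros; infer_instance

def pvWitness_delete_zeros : List (List Int) := [[0, 1], [1, 0]]

def Spec_delete_zeros (matrix : List (List Int)) (out : List (List Int)) : Prop := out = delete_zeros_alt matrix
instance (matrix : List (List Int)) (out : List (List Int)) : Decidable (Spec_delete_zeros matrix out) := by unfold Spec_delete_zeros; infer_instance

-- ===== CLAIM (what is proved, stated in full; the proofs are below) =====
def Claim_equal_delete_zeros : Prop := ∀ (matrix : List (List Int)), Dom_delete_zeros matrix → Pre_delete_zeros matrix → Spec_delete_zeros matrix (delete_zeros matrix)

-- ===== LEMMAS AND PROOFS =====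

-- number of unmarked (nonzero) cells: the termination measure of both loops
def ones (r : List (List Int)) : Nat := r.flatten.countP (fun a => a != 0)

def ShapeI (n m : Int) (r : List (List Int)) : Prop :=
  (r.length : Int) = n ∧ ∀ row ∈ r, (row.length : Int) = m

def InB (st : List (Int × Int)) : Prop := ∀ p ∈ st, 0 ≤ p.1 ∧ 0 ≤ p.2

-- the list of neighbours A's `lee` recurses into, in A's order
def nbrsA (mat : List (List Int)) (n m x y : Int) : List (Int × Int) :=
  (if 0 < x ∧ getC mat (x-1) y = 0 then [(x-1, y)] else []) ++
  (if x < n - 1 ∧ getC mat (x+1) y = 0 then [(x+1, y)] else []) ++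
  (if 0 < y ∧ getC mat x (y-1) = 0 then [(x, y-1)] else []) ++
  (if y < m - 1 ∧ getC mat x (y+1) = 0 then [(x, y+1)] else [])

-- the seed lists contributed by row i / column j of the border scans
def gRow (mat : List (List Int)) (m : Int) (i : Nat) : List (Int × Int) :=
  (if getC mat (i:Int) 0 = 0 then [((i:Int), (0:Int))] else []) ++
  (if getC mat (i:Int) (m-1) = 0 then [((i:Int), m-1)] else [])
def gCol (mat : List (List Int)) (n : Int) (j : Nat) : List (Int × Int) :=
  (if getC mat 0 (j:Int) = 0 then [((0:Int), (j:Int))] else []) ++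
  (if getC mat (n-1) (j:Int) = 0 then [(n-1, (j:Int))] else [])

-- canonical (fuel-saturated) versions
def leeC (mat : List (List Int)) (n m : Int) (r : List (List Int)) (x y : Int) : List (List Int) :=
  leeF mat n m (ones r + 1) r x y
def loopC (mat : List (List Int)) (n m : Int) (r : List (List Int)) (st : List (Int × Int)) : List (List Int) :=
  loopB mat n m (st.length + 4 * ones r + 1) r st
def foldLee (mat : List (List Int)) (n m : Int) (r : List (List Int)) (L : List (Int × Int)) : List (List Int) :=
  L.foldl (fun r p => leeC mat n m r p.1 p.2) r

theorem getC_bounds {r : List (List Int)} {x y : Int} (h : getC r x y ≠ 0) :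
    x.toNat < r.length ∧ y.toNat < (r.getD x.toNat []).length ∧ (r.getD x.toNat []).getD y.toNat 0 ≠ 0 := by
  unfold getC at h
  by_cases hx : x.toNat < r.length
  · by_cases hy : y.toNat < (r.getD x.toNat []).length
    · exact ⟨hx, hy, h⟩
    · rw [List.getD_eq_default _ _ (Nat.le_of_not_lt hy)] at h; exact absurd rfl h
  · rw [List.getD_eq_default _ _ (Nat.le_of_not_lt hx)] at h; simp at h

theorem countP_set0 : ∀ (l : List Int) (j : Nat), l.getD j 0 ≠ 0 →
    (l.set j 0).countP (fun a => a != 0) + 1 = l.countP (fun a => a != 0) := by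
  intro l
  induction l with
  | nil => intro j h; simp [List.getD] at h
  | cons a t ih =>
    intro j h
    cases j with
    | zero =>
      simp only [List.getD_cons_zero] at h
      simp [h]
    | succ j =>
      simp only [List.getD_cons_succ] at h
      simp only [List.set_cons_succ, List.countP_cons]
      have := ih j h
      omega

theorem ones_cons (row : List Int) (t : List (List Int)) :
    ones (row :: t) = row.countP (fun a => a != 0) + ones t := by
  simp [ones, List.countP_append]

theorem ones_row_set : ∀ (r : List (List Int)) (i : Nat) (row' : List Int), i < r.length →
    ones (r.set i row') + (r.getD i []).countP (fun a => a != 0) = ones r + row'.countP (fun a => a != 0) := by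
  intro r
  induction r with
  | nil => intro i row' h; simp at h
  | cons row t ih =>
    intro i row' h
    cases i with
    | zero => simp only [List.set_cons_zero, List.getD_cons_zero, ones_cons]; omega
    | succ i =>
      simp only [List.set_cons_succ, List.getD_cons_succ, ones_cons]
      have := ih i row' (by simpa using h)
      omega

theorem ones_rset_eq {r : List (List Int)} {x y : Int} (h : getC r x y ≠ 0) :
    ones (rset r x y 0) + 1 = ones r := by
  obtain ⟨hx, hy, hv⟩ := getC_bounds h
  unfold rset
  have h1 := ones_row_set r x.toNat ((r.getD x.toNat []).set y.toNat 0) hx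
  have h2 := countP_set0 (r.getD x.toNat []) y.toNat hv
  omega

theorem ones_pos {r : List (List Int)} {x y : Int} (h : getC r x y ≠ 0) : 1 ≤ ones r := by
  have := ones_rset_eq h; omega

theorem shape_rset {n m : Int} {r : List (List Int)} (h : ShapeI n m r) (x y v : Int) :
    ShapeI n m (rset r x y v) := by
  obtain ⟨h1, h2⟩ := h
  by_cases hx : x.toNat < r.length
  · refine ⟨by simp only [rset, List.length_set]; exact h1, ?_⟩
    intro row hrow
    rcases List.mem_or_eq_of_mem_set hrow with h' | h'
    · exact h2 row h'
    · subst h'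
      rw [List.length_set, List.getD_eq_getElem _ _ hx]
      exact h2 _ (List.getElem_mem hx)
  · unfold rset
    rw [List.set_eq_of_length_le (Nat.le_of_not_lt hx)]
    exact ⟨h1, h2⟩

theorem shape_ones_le {n m : Int} {r : List (List Int)} (h : ShapeI n m r) :
    (ones r : Int) ≤ n * m := by
  obtain ⟨h1, h2⟩ := h
  have hc : ones r ≤ r.flatten.length := List.countP_le_length
  have hsum : ((r.map List.length).sum : Int) = (r.length : Int) * m := by
    clear hc h1
    induction r with
    | nil => simp
    | cons row t ih =>
      have hrow := h2 row (by simp)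
      have ht : ∀ row ∈ t, (row.length : Int) = m := fun u hu => h2 u (by simp [hu])
      have ih' := ih ht
      simp only [List.map_cons, List.sum_cons, List.length_cons]
      push_cast at ih' ⊢
      rw [ih', hrow]; ring
  have := List.length_flatten (L := r)
  calc (ones r : Int) ≤ (r.flatten.length : Int) := by exact_mod_cast hc
    _ = ((r.map List.length).sum : Int) := by rw [this]
    _ = (r.length : Int) * m := hsum
    _ = n * m := by rw [h1]

theorem leeF_ones_le (mat : List (List Int)) (n m : Int) :
    ∀ (f : Nat) (r : List (List Int)) (x y : Int), ones (leeF mat n m f r x y) ≤ ones r := by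
  intro f
  induction f with
  | zero => intro r x y; simp [leeF]
  | succ f ih =>
    intro r x y
    by_cases h : getC r x y = 0
    · simp [leeF, h]
    · simp only [leeF, if_neg h]
      have h1 : ones (rset r x y 0) + 1 = ones r := ones_rset_eq h
      have step : ∀ (c : Prop) (inst : Decidable c) (a b : Int) (s : List (List Int)),
          ones s ≤ ones r → ones (if c then leeF mat n m f s a b else s) ≤ ones r := by
        intro c inst a b s hs
        split
        · exact le_trans (ih s a b) hs
        · exact hs
      exact step _ _ _ _ _ (step _ _ _ _ _ (step _ _ _ _ _ (step _ _ _ _ _ (by omega))))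

theorem leeF_shape (mat : List (List Int)) {n m : Int} :
    ∀ (f : Nat) (r : List (List Int)) (x y : Int), ShapeI n m r → ShapeI n m (leeF mat n m f r x y) := by
  intro f
  induction f with
  | zero => intro r x y h; simpa [leeF] using h
  | succ f ih =>
    intro r x y h
    by_cases hg : getC r x y = 0
    · simpa [leeF, hg] using h
    · simp only [leeF, if_neg hg]
      have step : ∀ (c : Prop) (inst : Decidable c) (a b : Int) (s : List (List Int)),
          ShapeI n m s → ShapeI n m (if c then leeF mat n m f s a b else s) := by
        intro c inst a b s hs
        split
        · exact ih s a b hs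
        · exact hs
      exact step _ _ _ _ _ (step _ _ _ _ _ (step _ _ _ _ _ (step _ _ _ _ _ (shape_rset h x y 0))))

theorem leeF_stable (mat : List (List Int)) (n m : Int) :
    ∀ (k f f' : Nat) (r : List (List Int)) (x y : Int), ones r ≤ k → k < f → k < f' →
      leeF mat n m f r x y = leeF mat n m f' r x y := by
  intro k
  induction k with
  | zero =>
    intro f f' r x y h0 hf hf'
    cases f with
    | zero => omega
    | succ f =>
      cases f' with
      | zero => omega
      | succ f' =>
        by_cases hg : getC r x y = 0
        · simp [leeF, hg]
        · exact absurd (ones_pos hg) (by omega)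
  | succ k ih =>
    intro f f' r x y hk hf hf'
    cases f with
    | zero => omega
    | succ f =>
      cases f' with
      | zero => omega
      | succ f' =>
        by_cases hg : getC r x y = 0
        · simp [leeF, hg]
        · simp only [leeF, if_neg hg]
          have hp := ones_pos hg
          have h1 : ones (rset r x y 0) + 1 = ones r := ones_rset_eq hg
          have bnd : ∀ (c : Prop) (inst : Decidable c) (a b : Int) (s : List (List Int)),
              ones s ≤ k → ones (if c then leeF mat n m f s a b else s) ≤ k := by
            intro c inst a b s hs
            split
            · exact le_trans (leeF_ones_le mat n m f s a b) hs
            · exact hs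
          have step : ∀ (c : Prop) (inst : Decidable c) (a b : Int) (s : List (List Int)),
              ones s ≤ k → (if c then leeF mat n m f s a b else s) = (if c then leeF mat n m f' s a b else s) := by
            intro c inst a b s hs
            split
            · exact ih f f' s a b hs (by omega) (by omega)
            · rfl
          have e0 : ones (rset r x y 0) ≤ k := by omega
          have E1 := step (0 < x ∧ getC mat (x-1) y = 0) inferInstance (x-1) y (rset r x y 0) e0
          have b1 := bnd (0 < x ∧ getC mat (x-1) y = 0) inferInstance (x-1) y (rset r x y 0) e0
          rw [← E1]
          have E2 := step (x < n - 1 ∧ getC mat (x+1) y = 0) inferInstance (x+1) y _ b1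
          have b2 := bnd (x < n - 1 ∧ getC mat (x+1) y = 0) inferInstance (x+1) y _ b1
          rw [← E2]
          have E3 := step (0 < y ∧ getC mat x (y-1) = 0) inferInstance x (y-1) _ b2
          have b3 := bnd (0 < y ∧ getC mat x (y-1) = 0) inferInstance x (y-1) _ b2
          rw [← E3]
          have E4 := step (y < m - 1 ∧ getC mat x (y+1) = 0) inferInstance x (y+1) _ b3
          rw [← E4]

theorem pushNbrs_length (mat : List (List Int)) (n m x y : Int) (st : List (Int × Int)) :
    (pushNbrs mat n m x y st).length ≤ st.length + 4 := by
  simp only [pushNbrs, List.foldl]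
  split_ifs <;> simp

theorem loopB_stable (mat : List (List Int)) (n m : Int) :
    ∀ (μ f f' : Nat) (r : List (List Int)) (st : List (Int × Int)),
      st.length + 4 * ones r ≤ μ → μ < f → μ < f' →
      loopB mat n m f r st = loopB mat n m f' r st := by
  intro μ
  induction μ with
  | zero =>
    intro f f' r st h hf hf'
    have : st = [] := List.length_eq_zero_iff.mp (by omega)
    subst this
    cases f with
    | zero => omega
    | succ f => cases f' with
      | zero => omega
      | succ f' => rfl
  | succ μ ih =>
    intro f f' r st h hf hf'
    cases f with
    | zero => omega
    | succ f =>
      cases f' with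
      | zero => omega
      | succ f' =>
        cases st with
        | nil => rfl
        | cons p t =>
          obtain ⟨x, y⟩ := p
          by_cases hg : getC r x y = 0
          · simp only [loopB, if_pos hg]
            exact ih f f' r t (by simp at h; omega) (by omega) (by omega)
          · simp only [loopB, if_neg hg]
            have h1 : ones (rset r x y 0) + 1 = ones r := ones_rset_eq hg
            have h2 := pushNbrs_length mat n m x y t
            exact ih f f' _ _ (by simp at h; omega) (by omega) (by omega)

theorem pushNbrs_eq (mat : List (List Int)) {n m x y : Int} (st : List (Int × Int))
    (hx0 : 0 ≤ x) (hy0 : 0 ≤ y) (hxn : x < n) (hym : y < m) :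
    pushNbrs mat n m x y st = nbrsA mat n m x y ++ st := by
  have c1 : (0 ≤ x ∧ x < n ∧ 0 ≤ y+1 ∧ y+1 < m ∧ getC mat x (y+1) = 0) ↔ (y < m - 1 ∧ getC mat x (y+1) = 0) := by
    constructor
    · rintro ⟨_, _, _, h4, h5⟩; exact ⟨by omega, h5⟩
    · rintro ⟨h1, h2⟩; exact ⟨hx0, hxn, by omega, by omega, h2⟩
  have c2 : (0 ≤ x ∧ x < n ∧ 0 ≤ y-1 ∧ y-1 < m ∧ getC mat x (y-1) = 0) ↔ (0 < y ∧ getC mat x (y-1) = 0) := by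
    constructor
    · rintro ⟨_, _, h3, _, h5⟩; exact ⟨by omega, h5⟩
    · rintro ⟨h1, h2⟩; exact ⟨hx0, hxn, by omega, by omega, h2⟩
  have c3 : (0 ≤ x+1 ∧ x+1 < n ∧ 0 ≤ y ∧ y < m ∧ getC mat (x+1) y = 0) ↔ (x < n - 1 ∧ getC mat (x+1) y = 0) := by
    constructor
    · rintro ⟨_, h2, _, _, h5⟩; exact ⟨by omega, h5⟩
    · rintro ⟨h1, h2⟩; exact ⟨by omega, by omega, hy0, hym, h2⟩
  have c4 : (0 ≤ x-1 ∧ x-1 < n ∧ 0 ≤ y ∧ y < m ∧ getC mat (x-1) y = 0) ↔ (0 < x ∧ getC mat (x-1) y = 0) := by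
    constructor
    · rintro ⟨h1, _, _, _, h5⟩; exact ⟨by omega, h5⟩
    · rintro ⟨h1, h2⟩; exact ⟨by omega, by omega, hy0, hym, h2⟩
  simp only [pushNbrs, nbrsA, List.foldl]
  simp only [c1, c2, c3, c4]
  split_ifs <;> simp

theorem nbrsA_InB (mat : List (List Int)) (n m : Int) {x y : Int} (hx0 : 0 ≤ x) (hy0 : 0 ≤ y) :
    InB (nbrsA mat n m x y) := by
  intro p hp
  simp only [nbrsA, List.mem_append] at hp
  rcases hp with ((h | h) | h) | h <;> split_ifs at h <;> simp_all <;> omega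

theorem leeC_skip {mat : List (List Int)} {n m : Int} {r : List (List Int)} {x y : Int}
    (h : getC r x y = 0) : leeC mat n m r x y = r := by
  simp [leeC, leeF, h]

theorem leeC_eq_foldLee {mat : List (List Int)} {n m : Int} {r : List (List Int)} {x y : Int}
    (h : getC r x y ≠ 0) :
    leeC mat n m r x y = foldLee mat n m (rset r x y 0) (nbrsA mat n m x y) := by
  have h1 := ones_rset_eq h
  have hp := ones_pos h
  have conv : ∀ (s : List (List Int)) (a b : Int), ones s ≤ ones (rset r x y 0) →
      leeF mat n m (ones r) s a b = leeC mat n m s a b := by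
    intro s a b hs
    exact leeF_stable mat n m (ones s) _ _ s a b le_rfl (by omega) (by omega)
  have bnd : ∀ (c : Prop) (inst : Decidable c) (a b : Int) (s : List (List Int)),
      ones s ≤ ones (rset r x y 0) → ones (if c then leeF mat n m (ones r) s a b else s) ≤ ones (rset r x y 0) := by
    intro c inst a b s hs
    split
    · exact le_trans (leeF_ones_le mat n m _ s a b) hs
    · exact hs
  have step : ∀ (c : Prop) (inst : Decidable c) (a b : Int) (s : List (List Int)),
      ones s ≤ ones (rset r x y 0) →
      (if c then leeF mat n m (ones r) s a b else s) = (if c then leeC mat n m s a b else s) := by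
    intro c inst a b s hs
    split
    · exact conv s a b hs
    · rfl
  have fstep : ∀ (c : Prop) (inst : Decidable c) (p : Int × Int) (s : List (List Int)),
      List.foldl (fun r q => leeC mat n m r q.1 q.2) s (if c then [p] else []) =
      (if c then leeC mat n m s p.1 p.2 else s) := by
    intro c inst p s
    split <;> simp [List.foldl]
  simp only [leeC, leeF, if_neg h] -- the outer leeC has fuel ones r + 1, so one unfolding step fires
  simp only [foldLee, nbrsA, List.foldl_append, fstep]
  -- projections already reduced
  have e0 : ones (rset r x y 0) ≤ ones (rset r x y 0) := le_rfl
  have E1 := step (0 < x ∧ getC mat (x-1) y = 0) inferInstance (x-1) y (rset r x y 0) e0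
  have b1 := bnd (0 < x ∧ getC mat (x-1) y = 0) inferInstance (x-1) y (rset r x y 0) e0
  rw [← E1]
  have E2 := step (x < n - 1 ∧ getC mat (x+1) y = 0) inferInstance (x+1) y _ b1
  have b2 := bnd (x < n - 1 ∧ getC mat (x+1) y = 0) inferInstance (x+1) y _ b1
  rw [← E2]
  have E3 := step (0 < y ∧ getC mat x (y-1) = 0) inferInstance x (y-1) _ b2
  have b3 := bnd (0 < y ∧ getC mat x (y-1) = 0) inferInstance x (y-1) _ b2
  rw [← E3]
  have E4 := step (y < m - 1 ∧ getC mat x (y+1) = 0) inferInstance x (y+1) _ b3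
  rw [← E4]


theorem foldLee_shape (mat : List (List Int)) {n m : Int} :
    ∀ (L : List (Int × Int)) (r : List (List Int)), ShapeI n m r → ShapeI n m (foldLee mat n m r L) := by
  intro L
  induction L with
  | nil => intro r h; simpa [foldLee] using h
  | cons p t ih =>
    intro r h
    simp only [foldLee, List.foldl_cons]
    exact ih _ (leeF_shape mat _ r p.1 p.2 h)

theorem loopC_nil (mat : List (List Int)) (n m : Int) (r : List (List Int)) :
    loopC mat n m r [] = r := by
  simp [loopC, loopB]

theorem nbrsA_length (mat : List (List Int)) (n m x y : Int) : (nbrsA mat n m x y).length ≤ 4 := by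
  unfold nbrsA; split_ifs <;> simp

theorem foldLee_append (mat : List (List Int)) (n m : Int) (r : List (List Int)) (L1 L2 : List (Int × Int)) :
    foldLee mat n m r (L1 ++ L2) = foldLee mat n m (foldLee mat n m r L1) L2 := by
  simp [foldLee, List.foldl_append]

theorem foldLee_cons (mat : List (List Int)) (n m : Int) (r : List (List Int)) (x y : Int) (t : List (Int × Int)) :
    foldLee mat n m r ((x, y) :: t) = foldLee mat n m (leeC mat n m r x y) t := by
  simp [foldLee]

-- the defunctionalization theorem: B's worklist run on L++st first performs A's recursive fills over L
theorem main_sim (mat : List (List Int)) (n m : Int) :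
    ∀ (k : Nat) (r : List (List Int)) (L st : List (Int × Int)),
      ones r ≤ k → ShapeI n m r → InB L →
      loopC mat n m r (L ++ st) = loopC mat n m (foldLee mat n m r L) st := by
  intro k
  induction k with
  | zero =>
    intro r L st h0 hsh hin
    induction L generalizing r with
    | nil => simp [foldLee]
    | cons p t ihL =>
      obtain ⟨x, y⟩ := p
      by_cases hg : getC r x y = 0
      · have e1 : loopC mat n m r ((x, y) :: (t ++ st)) = loopC mat n m r (t ++ st) := by
          simp only [loopC, List.length_cons, loopB, if_pos hg]
          have e : (t ++ st).length + 1 + 4 * ones r = (t ++ st).length + 4 * ones r + 1 := by ring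
          rw [e]
        rw [List.cons_append, e1, foldLee_cons, leeC_skip hg]
        exact ihL r h0 hsh (fun q hq => hin q (List.mem_cons_of_mem _ hq))
      · exact absurd (ones_pos hg) (by omega)
  | succ k ih =>
    intro r L st h0 hsh hin
    induction L generalizing r with
    | nil => simp [foldLee]
    | cons p t ihL =>
      obtain ⟨x, y⟩ := p
      by_cases hg : getC r x y = 0
      · have e1 : loopC mat n m r ((x, y) :: (t ++ st)) = loopC mat n m r (t ++ st) := by
          simp only [loopC, List.length_cons, loopB, if_pos hg]
          have e : (t ++ st).length + 1 + 4 * ones r = (t ++ st).length + 4 * ones r + 1 := by ring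
          rw [e]
        rw [List.cons_append, e1, foldLee_cons, leeC_skip hg]
        exact ihL r h0 hsh (fun q hq => hin q (List.mem_cons_of_mem _ hq))
      · have hxy := hin (x, y) List.mem_cons_self
        obtain ⟨hx0, hy0⟩ := hxy
        obtain ⟨hxb, hyb, _⟩ := getC_bounds hg
        have hxn : x < n := by
          have := hsh.1
          omega
        have hym : y < m := by
          have hrow : (r.getD x.toNat []) ∈ r := by
            rw [List.getD_eq_getElem _ _ hxb]
            exact List.getElem_mem hxb
          have := hsh.2 _ hrow
          omega
        have hone : ones (rset r x y 0) + 1 = ones r := ones_rset_eq hg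
        have e1 : loopC mat n m r ((x, y) :: (t ++ st)) =
            loopC mat n m (rset r x y 0) (nbrsA mat n m x y ++ (t ++ st)) := by
          simp only [loopC, List.length_cons, loopB, if_neg hg]
          rw [pushNbrs_eq mat (t ++ st) hx0 hy0 hxn hym]
          have hlen := nbrsA_length mat n m x y
          exact loopB_stable mat n m ((nbrsA mat n m x y ++ (t ++ st)).length + 4 * ones (rset r x y 0))
            _ _ _ _ le_rfl (by simp [List.length_append]; omega) (by omega)
        rw [List.cons_append, e1, ← List.append_assoc]
        rw [ih (rset r x y 0) (nbrsA mat n m x y ++ t) st (by omega) (shape_rset hsh x y 0)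
          (by
            intro q hq
            rcases List.mem_append.mp hq with hq | hq
            · exact nbrsA_InB mat n m hx0 hy0 q hq
            · exact hin q (List.mem_cons_of_mem _ hq))]
        rw [foldLee_cons, leeC_eq_foldLee hg, ← foldLee_append]


theorem phase1_eq (mat : List (List Int)) (n m : Int) (fuel : Nat) (hf : n * m < (fuel : Int)) :
    ∀ (idxs : List Nat) (r : List (List Int)), ShapeI n m r →
    idxs.foldl (fun r (i : Nat) =>
      if getC mat (i:Int) (m-1) = 0 then
        leeF mat n m fuel (if getC mat (i:Int) 0 = 0 then leeF mat n m fuel r (i:Int) 0 else r) (i:Int) (m-1)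
      else (if getC mat (i:Int) 0 = 0 then leeF mat n m fuel r (i:Int) 0 else r)) r
    = foldLee mat n m r (idxs.flatMap (gRow mat m)) := by
  intro idxs
  induction idxs with
  | nil => intro r _; simp [foldLee]
  | cons i t ihl =>
    intro r hsh
    have conv : ∀ (s : List (List Int)) (a b : Int), ShapeI n m s →
        leeF mat n m fuel s a b = leeC mat n m s a b := by
      intro s a b hs
      have hob := shape_ones_le hs
      exact leeF_stable mat n m (ones s) _ _ s a b le_rfl (by omega) (by omega)
    simp only [List.foldl_cons, List.flatMap_cons, foldLee_append]
    have s1 : ShapeI n m (if getC mat (i:Int) 0 = 0 then leeF mat n m fuel r (i:Int) 0 else r) := by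
      split
      · exact leeF_shape mat fuel r _ _ hsh
      · exact hsh
    have e1 : (if getC mat (i:Int) 0 = 0 then leeF mat n m fuel r (i:Int) 0 else r)
        = foldLee mat n m r (if getC mat (i:Int) 0 = 0 then [((i:Int), (0:Int))] else []) := by
      split
      · rw [conv r _ _ hsh]; simp [foldLee]
      · simp [foldLee]
    have s2 : ShapeI n m (if getC mat (i:Int) (m-1) = 0 then
        leeF mat n m fuel (if getC mat (i:Int) 0 = 0 then leeF mat n m fuel r (i:Int) 0 else r) (i:Int) (m-1)
        else (if getC mat (i:Int) 0 = 0 then leeF mat n m fuel r (i:Int) 0 else r)) := by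
      split
      · exact leeF_shape mat fuel _ _ _ s1
      · exact s1
    have e2 : (if getC mat (i:Int) (m-1) = 0 then
        leeF mat n m fuel (if getC mat (i:Int) 0 = 0 then leeF mat n m fuel r (i:Int) 0 else r) (i:Int) (m-1)
        else (if getC mat (i:Int) 0 = 0 then leeF mat n m fuel r (i:Int) 0 else r))
        = foldLee mat n m (if getC mat (i:Int) 0 = 0 then leeF mat n m fuel r (i:Int) 0 else r)
            (if getC mat (i:Int) (m-1) = 0 then [((i:Int), m-1)] else []) := by
      split
      · rw [conv _ _ _ s1]; simp [foldLee]
      · simp [foldLee]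
    rw [ihl _ s2, e2, e1]
    rw [gRow, foldLee_append]

theorem phase2_eq (mat : List (List Int)) (n m : Int) (fuel : Nat) (hf : n * m < (fuel : Int)) :
    ∀ (idxs : List Nat) (r : List (List Int)), ShapeI n m r →
    idxs.foldl (fun r (j : Nat) =>
      if getC mat (n-1) (j:Int) = 0 then
        leeF mat n m fuel (if getC mat 0 (j:Int) = 0 then leeF mat n m fuel r 0 (j:Int) else r) (n-1) (j:Int)
      else (if getC mat 0 (j:Int) = 0 then leeF mat n m fuel r 0 (j:Int) else r)) r
    = foldLee mat n m r (idxs.flatMap (gCol mat n)) := by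
  intro idxs
  induction idxs with
  | nil => intro r _; simp [foldLee]
  | cons j t ihl =>
    intro r hsh
    have conv : ∀ (s : List (List Int)) (a b : Int), ShapeI n m s →
        leeF mat n m fuel s a b = leeC mat n m s a b := by
      intro s a b hs
      have hob := shape_ones_le hs
      exact leeF_stable mat n m (ones s) _ _ s a b le_rfl (by omega) (by omega)
    simp only [List.foldl_cons, List.flatMap_cons, foldLee_append]
    have s1 : ShapeI n m (if getC mat 0 (j:Int) = 0 then leeF mat n m fuel r 0 (j:Int) else r) := by
      split
      · exact leeF_shape mat fuel r _ _ hsh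
      · exact hsh
    have e1 : (if getC mat 0 (j:Int) = 0 then leeF mat n m fuel r 0 (j:Int) else r)
        = foldLee mat n m r (if getC mat 0 (j:Int) = 0 then [((0:Int), (j:Int))] else []) := by
      split
      · rw [conv r _ _ hsh]; simp [foldLee]
      · simp [foldLee]
    have s2 : ShapeI n m (if getC mat (n-1) (j:Int) = 0 then
        leeF mat n m fuel (if getC mat 0 (j:Int) = 0 then leeF mat n m fuel r 0 (j:Int) else r) (n-1) (j:Int)
        else (if getC mat 0 (j:Int) = 0 then leeF mat n m fuel r 0 (j:Int) else r)) := by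
      split
      · exact leeF_shape mat fuel _ _ _ s1
      · exact s1
    have e2 : (if getC mat (n-1) (j:Int) = 0 then
        leeF mat n m fuel (if getC mat 0 (j:Int) = 0 then leeF mat n m fuel r 0 (j:Int) else r) (n-1) (j:Int)
        else (if getC mat 0 (j:Int) = 0 then leeF mat n m fuel r 0 (j:Int) else r))
        = foldLee mat n m (if getC mat 0 (j:Int) = 0 then leeF mat n m fuel r 0 (j:Int) else r)
            (if getC mat (n-1) (j:Int) = 0 then [(n-1, (j:Int))] else []) := by
      split
      · rw [conv _ _ _ s1]; simp [foldLee]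
      · simp [foldLee]
    rw [ihl _ s2, e2, e1]
    rw [gCol, foldLee_append]

theorem seedsRow_eq (mat : List (List Int)) (m : Int) :
    ∀ (idxs : List Nat) (acc : List (Int × Int)),
    idxs.foldl (fun s (i : Nat) =>
      if getC mat (i:Int) (m-1) = 0 then
        (if getC mat (i:Int) 0 = 0 then s ++ [((i:Int), (0:Int))] else s) ++ [((i:Int), m-1)]
      else (if getC mat (i:Int) 0 = 0 then s ++ [((i:Int), (0:Int))] else s)) acc
    = acc ++ idxs.flatMap (gRow mat m) := by
  intro idxs
  induction idxs with
  | nil => intro acc; simp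
  | cons i t ihl =>
    intro acc
    simp only [List.foldl_cons, List.flatMap_cons]
    rw [ihl]
    have e : (if getC mat (i:Int) (m-1) = 0 then
        (if getC mat (i:Int) 0 = 0 then acc ++ [((i:Int), (0:Int))] else acc) ++ [((i:Int), m-1)]
      else (if getC mat (i:Int) 0 = 0 then acc ++ [((i:Int), (0:Int))] else acc)) = acc ++ gRow mat m i := by
      unfold gRow; split_ifs <;> simp
    rw [e, List.append_assoc]

theorem seedsCol_eq (mat : List (List Int)) (n : Int) :
    ∀ (idxs : List Nat) (acc : List (Int × Int)),
    idxs.foldl (fun s (j : Nat) =>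
      if getC mat (n-1) (j:Int) = 0 then
        (if getC mat 0 (j:Int) = 0 then s ++ [((0:Int), (j:Int))] else s) ++ [(n-1, (j:Int))]
      else (if getC mat 0 (j:Int) = 0 then s ++ [((0:Int), (j:Int))] else s)) acc
    = acc ++ idxs.flatMap (gCol mat n) := by
  intro idxs
  induction idxs with
  | nil => intro acc; simp
  | cons j t ihl =>
    intro acc
    simp only [List.foldl_cons, List.flatMap_cons]
    rw [ihl]
    have e : (if getC mat (n-1) (j:Int) = 0 then
        (if getC mat 0 (j:Int) = 0 then acc ++ [((0:Int), (j:Int))] else acc) ++ [(n-1, (j:Int))]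
      else (if getC mat 0 (j:Int) = 0 then acc ++ [((0:Int), (j:Int))] else acc)) = acc ++ gCol mat n j := by
      unfold gCol; split_ifs <;> simp
    rw [e, List.append_assoc]

theorem runB_eq (mat : List (List Int)) (n m : Int) (F : Nat)
    (hF : ∀ kk : Nat, (kk : Int) ≤ n * m → 1 + 4 * kk < F) :
    ∀ (seeds : List (Int × Int)) (r : List (List Int)), ShapeI n m r → InB seeds →
    seeds.foldl (fun r s => loopB mat n m F r [s]) r = foldLee mat n m r seeds := by
  intro seeds
  induction seeds with
  | nil => intro r _ _; simp [foldLee]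
  | cons s t ihl =>
    intro r hsh hin
    obtain ⟨x, y⟩ := s
    have hob := shape_ones_le hsh
    have e1 : loopB mat n m F r [(x, y)] = loopC mat n m r [(x, y)] := by
      rw [loopC]
      exact loopB_stable mat n m (1 + 4 * ones r) F _ r [(x, y)] (by simp)
        (by have := hF (ones r) hob; omega) (by simp)
    have e2 : loopC mat n m r [(x, y)] = leeC mat n m r x y := by
      have hms := main_sim mat n m (ones r) r [(x, y)] [] le_rfl hsh
        (fun q hq => by
          simp only [List.mem_singleton] at hq
          subst hq
          exact hin (x, y) List.mem_cons_self)
      simp only [List.append_nil] at hms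
      rw [hms, loopC_nil]
      simp [foldLee]
    rw [List.foldl_cons, e1, e2, foldLee_cons]
    exact ihl (leeC mat n m r x y) (leeF_shape mat _ r x y hsh)
      (fun q hq => hin q (List.mem_cons_of_mem _ hq))

-- ===== VERDICT (by name: the statement is the Claim_ definition above) =====
theorem delete_zeros_spec : Claim_equal_delete_zeros := by
  unfold Claim_equal_delete_zeros
  intro matrix _ hpre
  obtain ⟨hne, hm, hrows⟩ := hpre
  have hn : 0 < matrix.length := by
    cases matrix with
    | nil => exact absurd rfl hne
    | cons a t => simp
  simp only [Spec_delete_zeros, delete_zeros, delete_zeros_alt]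
  have hsh0 : ShapeI (matrix.length : Int) ((matrix.headD []).length : Int)
      ((List.range matrix.length).map (fun _ => (List.range (matrix.headD []).length).map (fun _ => (1:Int)))) := by
    constructor
    · simp
    · intro row hrow
      obtain ⟨i, _, rfl⟩ := List.mem_map.mp hrow
      simp
  have hf : ((matrix.length : Int) * ((matrix.headD []).length : Int))
      < ((matrix.length * (matrix.headD []).length + 1 : Nat) : Int) := by push_cast; omega
  have hF : ∀ kk : Nat, (kk : Int) ≤ (matrix.length : Int) * ((matrix.headD []).length : Int) →
      1 + 4 * kk < 4 * (matrix.length * (matrix.headD []).length) + 2 := by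
    intro kk hk
    have : (kk : Int) ≤ ((matrix.length * (matrix.headD []).length : Nat) : Int) := by push_cast; push_cast at hk; omega
    have : kk ≤ matrix.length * (matrix.headD []).length := by exact_mod_cast this
    omega
  have hInB : InB ((List.range matrix.length).flatMap (gRow matrix ((matrix.headD []).length : Int))
      ++ (List.range (matrix.headD []).length).flatMap (gCol matrix (matrix.length : Int))) := by
    intro p hp
    rcases List.mem_append.mp hp with hp | hp
    · obtain ⟨i, _, hp⟩ := List.mem_flatMap.mp hp
      rcases List.mem_append.mp hp with hp | hp <;> split_ifs at hp <;> simp_all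
      omega
    · obtain ⟨j, _, hp⟩ := List.mem_flatMap.mp hp
      rcases List.mem_append.mp hp with hp | hp <;> split_ifs at hp <;> simp_all
      omega
  rw [phase1_eq matrix _ _ _ hf (List.range matrix.length) _ hsh0]
  rw [phase2_eq matrix _ _ _ hf (List.range (matrix.headD []).length) _
    (foldLee_shape matrix _ _ hsh0)]
  rw [seedsRow_eq, seedsCol_eq, List.nil_append]
  rw [runB_eq matrix _ _ _ hF _ _ hsh0 hInB]
  rw [← foldLee_append]
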